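-- pv_equiv track=rewrite | github.com/tentan2/Spotscan | ocr_analyzer.py | _assess_processing_level
-- ===== SOURCE A (Python) =====
-- def _assess_processing_level(ingredient: str) -> int:
--     """Assess processing level (1-5 scale)"""
--     ingredient_lower = ingredient.lower()
--
--     # Level 1: Whole, unaltered foods
--     level1_keywords = ['whole', 'fresh', 'raw', 'dried']
--     if any(keyword in ingredient_lower for keyword in level1_keywords):
--         return 1
--
--     # Level 2: Minimally processed
--     level2_keywords = ['chopped', 'cut', 'sliced', 'crushed', 'ground']
--     if any(keyword in ingredient_lower for keyword in level2_keywords):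
--         return 2
--
--     # Level 3: Naturally processed
--     level3_keywords = ['fermented', 'cultured', 'aged', 'cured', 'smoked']
--     if any(keyword in ingredient_lower for keyword in level3_keywords):
--         return 3
--
--     # Level 4: Combined natural foods
--     level4_keywords = ['blend', 'mix', 'puree', 'concentrate']
--     if any(keyword in ingredient_lower for keyword in level4_keywords):
--         return 4
--
--     # Level 5: Ultra-processed
--     level5_keywords = ['hydrogenated', 'modified', 'synthetic', 'artificial']
--     if any(keyword in ingredient_lower for keyword in level5_keywords):
--         return 5
--
--     # Default based on classification
--     return 3
-- ===== SOURCE B (Python) =====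
-- def _assess_processing_level(ingredient: str) -> int:
--     """Assess processing level (1-5 scale)"""
--     s = ingredient.lower()
--     table = {
--         1: ['whole', 'fresh', 'raw', 'dried'],
--         2: ['chopped', 'cut', 'sliced', 'crushed', 'ground'],
--         3: ['fermented', 'cultured', 'aged', 'cured', 'smoked'],
--         4: ['blend', 'mix', 'puree', 'concentrate'],
--         5: ['hydrogenated', 'modified', 'synthetic', 'artificial'],
--     }
--     matched = {level for level, keywords in table.items()
--                if any(kw in s for kw in keywords)}
--     return min(matched) if matched else 3
-- ===== Notes on version B (the rewrite author's own statement) =====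
-- stated objective: alternative
-- what changed: Replaces the five ordered short-circuit guard blocks with a level-to-keywords table, a collect-all-matching-levels set comprehension, and a final min-with-default-3 reduction.
import Mathlib
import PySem

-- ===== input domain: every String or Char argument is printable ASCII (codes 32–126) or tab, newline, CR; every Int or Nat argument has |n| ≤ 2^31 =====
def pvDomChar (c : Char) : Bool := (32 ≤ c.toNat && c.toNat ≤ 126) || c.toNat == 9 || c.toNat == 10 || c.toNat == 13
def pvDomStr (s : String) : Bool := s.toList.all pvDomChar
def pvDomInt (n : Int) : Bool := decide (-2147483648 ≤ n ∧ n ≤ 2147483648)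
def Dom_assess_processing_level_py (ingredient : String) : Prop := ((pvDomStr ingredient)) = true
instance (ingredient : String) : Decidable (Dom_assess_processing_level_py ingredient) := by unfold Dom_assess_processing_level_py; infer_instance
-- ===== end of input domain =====

-- B replaces A's five ordered early-return keyword guards with a level→keywords table,
-- a collect-matching-levels set, and a min-with-default-3 reduction (alternative decomposition).


-- ===== PORT A =====
def assess_processing_level_py (ingredient : String) : Int :=
  let ingredient_lower := PySem.Str.lower ingredient
  let level1_keywords := ["whole", "fresh", "raw", "dried"]
  if level1_keywords.any (fun kw => PySem.Str.isIn kw ingredient_lower) then 1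
  else
  let level2_keywords := ["chopped", "cut", "sliced", "crushed", "ground"]
  if level2_keywords.any (fun kw => PySem.Str.isIn kw ingredient_lower) then 2
  else
  let level3_keywords := ["fermented", "cultured", "aged", "cured", "smoked"]
  if level3_keywords.any (fun kw => PySem.Str.isIn kw ingredient_lower) then 3
  else
  let level4_keywords := ["blend", "mix", "puree", "concentrate"]
  if level4_keywords.any (fun kw => PySem.Str.isIn kw ingredient_lower) then 4
  else
  let level5_keywords := ["hydrogenated", "modified", "synthetic", "artificial"]
  if level5_keywords.any (fun kw => PySem.Str.isIn kw ingredient_lower) then 5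
  else 3

-- ===== PORT B =====
def assess_processing_level_py_alt (ingredient : String) : Int :=
  let s := PySem.Str.lower ingredient
  let table : List (Int × List String) :=
    [(1, ["whole", "fresh", "raw", "dried"]),
     (2, ["chopped", "cut", "sliced", "crushed", "ground"]),
     (3, ["fermented", "cultured", "aged", "cured", "smoked"]),
     (4, ["blend", "mix", "puree", "concentrate"]),
     (5, ["hydrogenated", "modified", "synthetic", "artificial"])]
  let matched : PySem.Set Int :=
    table.foldl (fun acc p =>
      if p.2.any (fun kw => PySem.Str.isIn kw s) then PySem.Set.add acc p.1 else acc)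
      PySem.Set.empty
  if matched ≠ [] then (PySem.List.min? matched (fun x => x)).getD 3 else 3

-- ===== PRECONDITION & SPEC =====
def Spec_assess_processing_level_py (ingredient : String) (out : Int) : Prop := out = assess_processing_level_py_alt ingredient
instance (ingredient : String) (out : Int) : Decidable (Spec_assess_processing_level_py ingredient out) := by unfold Spec_assess_processing_level_py; infer_instance

-- ===== CLAIM (what is proved, stated in full; the proofs are below) =====
def Claim_equal_assess_processing_level_py : Prop := ∀ (ingredient : String), Dom_assess_processing_level_py ingredient → Spec_assess_processing_level_py ingredient (assess_processing_level_py ingredient)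

-- ===== LEMMAS AND PROOFS =====

-- ===== VERDICT (by name: the statement is the Claim_ definition above) =====
theorem assess_processing_level_py_spec : Claim_equal_assess_processing_level_py := by
  intro ingredient _
  unfold Spec_assess_processing_level_py assess_processing_level_py assess_processing_level_py_alt
  simp only [List.foldl]
  generalize (["whole", "fresh", "raw", "dried"] : List String).any (fun kw => PySem.Str.isIn kw (PySem.Str.lower ingredient)) = b1
  generalize (["chopped", "cut", "sliced", "crushed", "ground"] : List String).any (fun kw => PySem.Str.isIn kw (PySem.Str.lower ingredient)) = b2
  generalize (["fermented", "cultured", "aged", "cured", "smoked"] : List String).any (fun kw => PySem.Str.isIn kw (PySem.Str.lower ingredient)) = b3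
  generalize (["blend", "mix", "puree", "concentrate"] : List String).any (fun kw => PySem.Str.isIn kw (PySem.Str.lower ingredient)) = b4
  generalize (["hydrogenated", "modified", "synthetic", "artificial"] : List String).any (fun kw => PySem.Str.isIn kw (PySem.Str.lower ingredient)) = b5
  revert b1 b2 b3 b4 b5
  decide
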